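-- pv_equiv track=rewrite | github.com/Ra0ul/Algorithm | 프로그래머스/lv0/120861. 캐릭터의 좌표/캐릭터의 좌표.py | solution
-- ===== SOURCE A (Python) =====
-- def solution(keyinput, board):
--     limit = [board[0]//2,board[1]//2]
--     answer = []
--     x_pos = []
--     y_pos = []
--
--     for i in keyinput:
--         if i == "up":
--             y_pos.append(1)
--             if abs(sum(y_pos)) > limit[1]:
--                 y_pos.remove(1)
--         if i == "down":
--             y_pos.append(-1)
--
--             if abs(sum(y_pos)) > limit[1]:
--                 y_pos.remove(-1)
--         if i == "right":
--             x_pos.append(1)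
--             if abs(sum(x_pos)) > limit[0]:
--                 x_pos.remove(1)
--         if i == "left":
--             x_pos.append(-1)
--             if abs(sum(x_pos)) > limit[0]:
--                 x_pos.remove(-1)
--     answer = [sum(x_pos), sum(y_pos)]
--
--     return answer
-- ===== SOURCE B (Python) =====
-- def solution(keyinput, board):
--     lim_x, lim_y = board[0] // 2, board[1] // 2
--     x = y = 0
--     for k in keyinput:
--         if k == "up":
--             if abs(y + 1) <= lim_y:
--                 y += 1
--         elif k == "down":
--             if abs(y - 1) <= lim_y:
--                 y -= 1
--         elif k == "right":
--             if abs(x + 1) <= lim_x: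
--                 x += 1
--         elif k == "left":
--             if abs(x - 1) <= lim_x:
--                 x -= 1
--     return [x, y]
-- ===== Notes on version B (the rewrite author's own statement) =====
-- stated objective: simpler
-- what changed: B keeps two running integer coordinates updated in place with a bounds check instead of A's per-move append/sum/remove bookkeeping over growing move lists.
import Mathlib
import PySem

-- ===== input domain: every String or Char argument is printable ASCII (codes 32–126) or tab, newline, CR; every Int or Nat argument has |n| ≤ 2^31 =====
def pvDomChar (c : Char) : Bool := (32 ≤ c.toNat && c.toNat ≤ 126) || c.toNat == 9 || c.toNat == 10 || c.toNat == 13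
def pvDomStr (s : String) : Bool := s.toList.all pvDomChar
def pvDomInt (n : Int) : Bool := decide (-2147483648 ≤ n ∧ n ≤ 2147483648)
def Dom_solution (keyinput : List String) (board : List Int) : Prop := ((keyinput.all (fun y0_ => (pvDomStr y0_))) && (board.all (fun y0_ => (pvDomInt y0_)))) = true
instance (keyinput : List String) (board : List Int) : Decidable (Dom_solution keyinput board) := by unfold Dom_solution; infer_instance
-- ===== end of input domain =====

-- B replaces A's append/sum/remove move-list bookkeeping with two running clamped coordinates (simpler).


-- ===== PORT A =====
-- one list-append step of A: append v, then remove it again if the sum left the limit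
-- (the `.getD` fallback is unreachable: v was just appended, so list.remove(v) never raises)
def solAStep (pos : List Int) (v lim : Int) : List Int :=
  let pos' := pos ++ [v]
  if |pos'.sum| > lim then (PySem.List.remove? pos' v).getD pos' else pos'

-- A's loop body: the four consecutive `if` statements, updating (x_pos, y_pos)
def solABody (limit : List Int) (st : List Int × List Int) (i : String) : List Int × List Int :=
  let st := if i == "up"    then (st.1, solAStep st.2 1    (PySem.List.pyGetD limit 1 0)) else st
  let st := if i == "down"  then (st.1, solAStep st.2 (-1) (PySem.List.pyGetD limit 1 0)) else st
  let st := if i == "right" then (solAStep st.1 1    (PySem.List.pyGetD limit 0 0), st.2) else st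
  let st := if i == "left"  then (solAStep st.1 (-1) (PySem.List.pyGetD limit 0 0), st.2) else st
  st

def solution (keyinput : List String) (board : List Int) : List Int :=
  -- board[0], board[1]: Pre_solution guarantees 2 ≤ board.length, so pyGetD's default is unreachable
  let limit : List Int := [PySem.Int.floordiv (PySem.List.pyGetD board 0 0) 2,
                           PySem.Int.floordiv (PySem.List.pyGetD board 1 0) 2]
  let st := keyinput.foldl (solABody limit) ([], [])
  [st.1.sum, st.2.sum]

-- ===== PORT B =====
-- B's loop body: clamped incremental update of the running coordinates
def solBBody (limX limY : Int) (st : Int × Int) (k : String) : Int × Int :=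
  if k == "up" then (st.1, if |st.2 + 1| ≤ limY then st.2 + 1 else st.2)
  else if k == "down" then (st.1, if |st.2 - 1| ≤ limY then st.2 - 1 else st.2)
  else if k == "right" then ((if |st.1 + 1| ≤ limX then st.1 + 1 else st.1), st.2)
  else if k == "left" then ((if |st.1 - 1| ≤ limX then st.1 - 1 else st.1), st.2)
  else st

def solution_alt (keyinput : List String) (board : List Int) : List Int :=
  let limX := PySem.Int.floordiv (PySem.List.pyGetD board 0 0) 2
  let limY := PySem.Int.floordiv (PySem.List.pyGetD board 1 0) 2
  let st := keyinput.foldl (solBBody limX limY) (0, 0)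
  [st.1, st.2]

-- ===== PRECONDITION & SPEC =====
-- Pre_: A evaluates board[0] and board[1], raising IndexError on boards with fewer than 2 elements.
def Pre_solution (keyinput : List String) (board : List Int) : Prop := 2 ≤ board.length
instance (keyinput : List String) (board : List Int) : Decidable (Pre_solution keyinput board) := by unfold Pre_solution; infer_instance
def pvWitness_solution : List String × List Int := (["up", "left"], [5, 7])

def Spec_solution (keyinput : List String) (board : List Int) (out : List Int) : Prop := out = solution_alt keyinput board
instance (keyinput : List String) (board : List Int) (out : List Int) : Decidable (Spec_solution keyinput board out) := by unfold Spec_solution; infer_instance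

-- ===== CLAIM (what is proved, stated in full; the proofs are below) =====
def Claim_equal_solution : Prop := ∀ (keyinput : List String) (board : List Int), Dom_solution keyinput board → Pre_solution keyinput board → Spec_solution keyinput board (solution keyinput board)

-- ===== LEMMAS AND PROOFS =====

-- the sum of A's list state after one step is B's clamped update of the old sum
theorem sum_solAStep (pos : List Int) (v lim : Int) :
    (solAStep pos v lim).sum = if |pos.sum + v| ≤ lim then pos.sum + v else pos.sum := by
  have hmem : v ∈ pos ++ [v] := by simp
  have hrem : PySem.List.remove? (pos ++ [v]) v = some ((pos ++ [v]).erase v) :=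
    PySem.List.remove?_eq_some_erase (pos ++ [v]) v hmem
  have herase : ((pos ++ [v]).erase v).sum = pos.sum := by
    have h := List.sum_erase hmem
    simp only [List.sum_append, List.sum_cons, List.sum_nil] at h
    omega
  simp only [solAStep, hrem, Option.getD_some, apply_ite List.sum, herase,
    List.sum_append, List.sum_cons, List.sum_nil, add_zero]
  split_ifs with h1 h2 h3
  · exact absurd h2 (not_le.mpr h1)
  · rfl
  · rfl
  · exact absurd (not_lt.mp h1) h3

-- componentwise sums of one A step = one B step on the sums
theorem body_sum (limX limY : Int) (st : List Int × List Int) (i : String) :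
    ((solABody [limX, limY] st i).1.sum, (solABody [limX, limY] st i).2.sum) =
      solBBody limX limY (st.1.sum, st.2.sum) i := by
  simp only [solABody, solBBody, PySem.List.pyGetD, PySem.List.pyGet?, PySem.List.pyIdx?]
  by_cases hu : i = "up"
  · subst hu; simp [sum_solAStep]
  · by_cases hd : i = "down"
    · subst hd; simp [sum_solAStep, sub_eq_add_neg]
    · by_cases hr : i = "right"
      · subst hr; simp [sum_solAStep]
      · by_cases hl : i = "left"
        · subst hl; simp [sum_solAStep, sub_eq_add_neg]
        · simp [hu, hd, hr, hl]

-- ===== VERDICT (by name: the statement is the Claim_ definition above) =====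
theorem solution_spec : Claim_equal_solution := by
  intro keyinput board _ _
  unfold Spec_solution solution solution_alt
  have h := List.foldl_hom (f := fun st : List Int × List Int => (st.1.sum, st.2.sum))
    (g₁ := solABody [PySem.Int.floordiv (PySem.List.pyGetD board 0 0) 2,
                     PySem.Int.floordiv (PySem.List.pyGetD board 1 0) 2])
    (g₂ := solBBody (PySem.Int.floordiv (PySem.List.pyGetD board 0 0) 2)
                    (PySem.Int.floordiv (PySem.List.pyGetD board 1 0) 2))
    (l := keyinput) (init := ([], []))
    (H := fun st i => (body_sum _ _ st i).symm)
  simp only [List.sum_nil] at h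
  simp only [h]
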